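-- pv_equiv track=rewrite | github.com/Av1hoo/2048-AI | game.py | bitboard_count_empty
-- ===== SOURCE A (Python) =====
-- def bitboard_count_empty(bitboard):
--     count = 0
--     tmp = bitboard
--     for _ in range(16):
--         if (tmp & 0xF) == 0:
--             count += 1
--         tmp >>= 4
--     return count
-- ===== SOURCE B (Python) =====
-- def bitboard_count_empty(bitboard):
--     return format(bitboard & 0xFFFFFFFFFFFFFFFF, '016x').count('0')
-- ===== Notes on version B (the rewrite author's own statement) =====
-- stated objective: idiomatic
-- what changed: Replaced the per-nibble shift-and-mask loop by masking the board to its low nibbles and counting the '0' characters of the fixed-width zero-padded lowercase hex rendering.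
import Mathlib
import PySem

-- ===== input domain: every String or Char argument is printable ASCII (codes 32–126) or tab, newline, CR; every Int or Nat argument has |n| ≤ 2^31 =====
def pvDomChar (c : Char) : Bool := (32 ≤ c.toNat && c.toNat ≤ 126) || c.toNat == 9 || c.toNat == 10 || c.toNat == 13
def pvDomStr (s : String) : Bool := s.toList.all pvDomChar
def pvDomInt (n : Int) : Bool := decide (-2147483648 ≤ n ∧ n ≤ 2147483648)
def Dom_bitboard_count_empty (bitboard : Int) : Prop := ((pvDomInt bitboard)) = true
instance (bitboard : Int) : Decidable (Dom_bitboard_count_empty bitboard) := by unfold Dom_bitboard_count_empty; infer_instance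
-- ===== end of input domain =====

-- B replaces A's per-nibble shift-and-mask loop by masking the board and counting the '0'
-- characters of its fixed-width zero-padded lowercase hex rendering (idiomatic, same cost).

-- ===== PORT A =====
def bitboard_count_empty (bitboard : Int) : Int :=
  (((PySem.List.pyRange 0 16 1).foldl
      (fun (st : Int × Int) _ =>
        ((if PySem.Int.band st.2 0xF == 0 then st.1 + 1 else st.1), st.2 >>> (4 : Nat)))
      (0, bitboard))).1

-- ===== PORT B =====
-- hex digit d (0 ≤ d ≤ 15) as Python's lowercase hex character
def hexDigit (d : Nat) : Char := Char.ofNat (if d < 10 then 48 + d else 87 + d)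

-- hand port of the digit production of format(n, 'x') for nonnegative n: exact
-- (most significant digit first, "0" for n = 0)
def hexChars (n : Nat) : List Char :=
  if n < 16 then [hexDigit n]
  else hexChars (n / 16) ++ [hexDigit (n % 16)]
  decreasing_by exact Nat.div_lt_self (by omega) (by omega)

def bitboard_count_empty_alt (bitboard : Int) : Int :=
  -- bitboard & 0xFFFFFFFFFFFFFFFF
  let m := PySem.Int.band bitboard 0xFFFFFFFFFFFFFFFF
  -- format(m, '016x'): left-pad the hex digits with '0' to width 16 (m is nonnegative here)
  let hs := List.replicate (16 - (hexChars m.toNat).length) '0' ++ hexChars m.toNat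
  -- .count('0') with a single-character needle is the character count
  ((hs.count '0' : Nat) : Int)

-- ===== PRECONDITION & SPEC =====
def Spec_bitboard_count_empty (bitboard : Int) (out : Int) : Prop := out = bitboard_count_empty_alt bitboard
instance (bitboard : Int) (out : Int) : Decidable (Spec_bitboard_count_empty bitboard out) := by unfold Spec_bitboard_count_empty; infer_instance

-- ===== CLAIM (what is proved, stated in full; the proofs are below) =====
def Claim_equal_bitboard_count_empty : Prop := ∀ (bitboard : Int), Dom_bitboard_count_empty bitboard → Spec_bitboard_count_empty bitboard (bitboard_count_empty bitboard)

-- ===== LEMMAS AND PROOFS =====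

-- number of zero nibbles among the low k nibbles of t (Python bit semantics)
def pvZ : Nat → Int → Nat
  | 0, _ => 0
  | k+1, t => (if PySem.Int.band t 0xF = 0 then 1 else 0) + pvZ k (t >>> (4 : Nat))

-- number of zero base-16 digits among the low k digits of a natural number
def pvY : Nat → Nat → Nat
  | 0, _ => 0
  | k+1, n => (if n % 16 = 0 then 1 else 0) + pvY k (n / 16)

theorem pv_shiftRight4 (t : Int) : t >>> (4 : Nat) = t / 16 := by
  cases t with
  | ofNat n =>
      show Int.ofNat (n >>> 4) = _
      rw [Nat.shiftRight_eq_div_pow]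
      rfl
  | negSucc n =>
      show Int.negSucc (n >>> 4) = _
      rw [Nat.shiftRight_eq_div_pow]
      rfl

theorem pv_band_mask (t : Int) (i : Nat) :
    PySem.Int.band t ((2 : Int) ^ i - 1) = t % ((2 : Int) ^ i) := by
  have hc : (((2 : Nat) ^ i : Nat) : Int) = (2 : Int) ^ i := by push_cast; ring
  have hp : (0 : Int) < (2 : Int) ^ i := by positivity
  have hm : ((2 : Int) ^ i - 1).toNat = 2 ^ i - 1 := by omega
  cases t with
  | ofNat n =>
      rw [show Int.ofNat n = (n : Int) from rfl]
      rw [PySem.Int.band_of_nonneg (by positivity) (by omega)]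
      rw [Int.toNat_natCast, hm, Nat.and_two_pow_sub_one_eq_mod]
      push_cast
      ring
  | negSucc n =>
      have hneg : ¬ (0 : Int) ≤ Int.negSucc n := by rw [Int.negSucc_eq]; omega
      rw [PySem.Int.band, if_neg hneg, if_pos (by omega), hm]
      have h2 : (-(Int.negSucc n) - 1).toNat = n := by rw [Int.negSucc_eq]; omega
      rw [h2, Nat.and_comm, Nat.and_two_pow_sub_one_eq_mod, Int.negSucc_eq]
      have hq : (2 : Int) ^ i * ((n : Int) / 2 ^ i) + (n : Int) % 2 ^ i = n :=
        Int.ediv_add_emod _ _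
      have hm0 : (0 : Int) ≤ (n : Int) % 2 ^ i := Int.emod_nonneg _ (by omega)
      have hm1 : (n : Int) % 2 ^ i < 2 ^ i := Int.emod_lt_of_pos _ hp
      have h3 : (-((n : Int) + 1)) % 2 ^ i = 2 ^ i - 1 - ((n : Int) % 2 ^ i) := by
        have hrw : (-((n : Int) + 1)) =
            (2 ^ i - 1 - ((n : Int) % 2 ^ i)) + 2 ^ i * (-((n : Int) / 2 ^ i) - 1) := by
          have hqq : (2 : Int) ^ i * (-((n : Int) / 2 ^ i) - 1)
              = -((2 : Int) ^ i * ((n : Int) / 2 ^ i)) - 2 ^ i := by ring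
          omega
        rw [hrw, Int.add_mul_emod_self_left]
        exact Int.emod_eq_of_lt (by omega) (by omega)
      rw [h3]
      have hmodc : ((n % 2 ^ i : Nat) : Int) = (n : Int) % ((2 : Int) ^ i) := by
        push_cast; ring
      have hltn : n % 2 ^ i < 2 ^ i := Nat.mod_lt _ (by positivity)
      omega

theorem pv_band15 (t : Int) : PySem.Int.band t 0xF = t % 16 := by
  have := pv_band_mask t 4
  norm_num at this
  exact this

theorem pv_loopA (l : List Int) (c t : Int) :
    ((l.foldl
      (fun (st : Int × Int) _ =>
        ((if PySem.Int.band st.2 0xF == 0 then st.1 + 1 else st.1), st.2 >>> (4 : Nat)))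
      (c, t))).1 = c + (pvZ l.length t : Int) := by
  induction l generalizing c t with
  | nil => simp [pvZ]
  | cons x xs ih =>
      rw [List.foldl_cons]
      rw [ih]
      by_cases h : PySem.Int.band t 0xF = 0
      · simp [pvZ, h]; ring
      · simp [pvZ, h]

theorem pv_Z_add_pow (k : Nat) (t s : Int) :
    pvZ k (t + 2 ^ (4 * k) * s) = pvZ k t := by
  induction k generalizing t s with
  | zero => rfl
  | succ k ih =>
      have hsplit : t + 2 ^ (4 * (k + 1)) * s = t + 16 * ((2 : Int) ^ (4 * k) * s) := by
        rw [show 4 * (k + 1) = 4 * k + 4 from by omega, pow_add]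
        ring
      rw [pvZ, pvZ, hsplit]
      have hband : PySem.Int.band (t + 16 * ((2 : Int) ^ (4 * k) * s)) 0xF
          = PySem.Int.band t 0xF := by
        rw [pv_band15, pv_band15, Int.add_mul_emod_self_left]
      have hshift : (t + 16 * ((2 : Int) ^ (4 * k) * s)) >>> (4 : Nat)
          = t >>> (4 : Nat) + (2 : Int) ^ (4 * k) * s := by
        rw [pv_shiftRight4, pv_shiftRight4]
        rw [show t + 16 * ((2 : Int) ^ (4 * k) * s) = t + ((2 : Int) ^ (4 * k) * s) * 16 from by ring]
        exact Int.add_mul_ediv_right _ _ (by norm_num)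
      rw [hband, hshift, ih]

theorem pv_Z_natCast (k : Nat) (n : Nat) : pvZ k (n : Int) = pvY k n := by
  induction k generalizing n with
  | zero => rfl
  | succ k ih =>
      rw [pvZ, pvY]
      have h1 : PySem.Int.band (n : Int) 0xF = ((n % 16 : Nat) : Int) := by
        rw [pv_band15]; push_cast; ring
      have h2 : (n : Int) >>> (4 : Nat) = ((n / 16 : Nat) : Int) := by
        show Int.ofNat (n >>> 4) = _
        rw [Nat.shiftRight_eq_div_pow]
        rfl
      rw [h1, h2, ih]
      by_cases h : n % 16 = 0
      · simp [h]
      · simp [h]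
        omega

theorem pv_Y_zero (k : Nat) : pvY k 0 = k := by
  induction k with
  | zero => rfl
  | succ k ih => rw [pvY]; simp [ih]; omega

theorem pv_hexDigit_zero (d : Nat) (hd : d < 16) : (hexDigit d = '0') ↔ d = 0 := by
  interval_cases d <;> simp [hexDigit]

theorem pv_count_hex (k : Nat) : ∀ n : Nat, n < 16 ^ (k + 1) →
    (List.replicate ((k + 1) - (hexChars n).length) '0' ++ hexChars n).count '0'
      = pvY (k + 1) n := by
  induction k with
  | zero =>
      intro n hn
      have hn' : n < 16 := by norm_num at hn; omega
      rw [hexChars, if_pos hn']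
      simp only [List.length_cons, List.length_nil]
      rw [Nat.sub_self, List.replicate_zero, List.nil_append]
      rw [List.count_singleton]
      simp only [beq_iff_eq]
      rw [if_congr (pv_hexDigit_zero n hn') rfl rfl]
      rw [pvY, pvY, Nat.mod_eq_of_lt hn']
      by_cases h : n = 0 <;> simp [h]
  | succ k ih =>
      intro n hn
      by_cases hn16 : n < 16
      · rw [hexChars, if_pos hn16]
        simp only [List.length_cons, List.length_nil]
        rw [List.count_append, List.count_replicate, List.count_singleton]
        simp only [beq_iff_eq]
        rw [if_congr (pv_hexDigit_zero n hn16) rfl rfl]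
        rw [pvY]
        rw [Nat.mod_eq_of_lt hn16, Nat.div_eq_of_lt hn16, pv_Y_zero]
        by_cases h : n = 0 <;> simp [h] <;> omega
      · rw [hexChars, if_neg hn16]
        have hdiv : n / 16 < 16 ^ (k + 1) := by
          rw [Nat.div_lt_iff_lt_mul (by norm_num)]
          calc n < 16 ^ (k + 1 + 1) := hn
            _ = 16 ^ (k + 1) * 16 := by ring
        have hlen : (k + 1 + 1) - ((hexChars (n / 16)).length + 1)
            = (k + 1) - (hexChars (n / 16)).length := by omega
        rw [List.length_append]
        simp only [List.length_cons, List.length_nil]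
        rw [hlen, ← List.append_assoc, List.count_append, ih (n / 16) hdiv]
        rw [List.count_singleton]
        simp only [beq_iff_eq]
        have hm : n % 16 < 16 := Nat.mod_lt _ (by norm_num)
        rw [if_congr (pv_hexDigit_zero _ hm) rfl rfl]
        conv_rhs => rw [pvY]
        by_cases h : n % 16 = 0 <;> simp [h] <;> omega

-- ===== VERDICT (by name: the statement is the Claim_ definition above) =====
theorem bitboard_count_empty_spec : Claim_equal_bitboard_count_empty := by
  intro b hDom
  have hb : -2147483648 ≤ b ∧ b ≤ 2147483648 := by
    have := of_decide_eq_true hDom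
    exact this
  unfold Spec_bitboard_count_empty bitboard_count_empty bitboard_count_empty_alt
  -- A's loop counts the zero nibbles among the low 16 nibbles of b
  rw [show (PySem.List.pyRange 0 16 1) =
      [0, 1, 2, 3, 4, 5, 6, 7, 8, 9, 10, 11, 12, 13, 14, 15] from rfl]
  rw [pv_loopA]
  rw [show ([0, 1, 2, 3, 4, 5, 6, 7, 8, 9, 10, 11, 12, 13, 14, 15] : List Int).length = 16
      from rfl]
  rw [zero_add]
  -- the mask is reduction mod 2^64
  have hmask : PySem.Int.band b 0xFFFFFFFFFFFFFFFF = b % ((2 : Int) ^ 64) := by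
    have := pv_band_mask b 64
    norm_num at this ⊢
    exact this
  rw [hmask]
  set e : Int := b % ((2 : Int) ^ 64) with he
  have hpos : (0 : Int) < 2 ^ 64 := by positivity
  have he0 : 0 ≤ e := Int.emod_nonneg b (by positivity)
  have he1 : e < 2 ^ 64 := Int.emod_lt_of_pos b hpos
  -- b and e have the same low 16 nibbles
  have hZ : pvZ 16 b = pvZ 16 e := by
    have hsum : (2 : Int) ^ 64 * (b / 2 ^ 64) + b % 2 ^ 64 = b := Int.ediv_add_emod b _
    have hb' : b = e + 2 ^ (4 * 16) * (b / 2 ^ 64) := by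
      rw [he, show (4 * 16 : Nat) = 64 from rfl]
      omega
    rw [hb', pv_Z_add_pow]
  -- pass to the natural number e.toNat and its 16 hex digits
  have hcast : ((e.toNat : Nat) : Int) = e := Int.toNat_of_nonneg he0
  have hnn : e.toNat < 16 ^ 16 := by
    have : ((16 : Nat) ^ 16 : Int) = 2 ^ 64 := by norm_num
    omega
  have hcount := pv_count_hex 15 e.toNat (by norm_num at hnn ⊢; omega)
  rw [show (15 + 1 : Nat) = 16 from rfl] at hcount
  show ((pvZ 16 b : Nat) : Int)
      = ((List.count '0' (List.replicate (16 - (hexChars e.toNat).length) '0'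
          ++ hexChars e.toNat) : Nat) : Int)
  rw [hcount, hZ, ← hcast, pv_Z_natCast, Int.toNat_natCast]
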